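-- pv_equiv track=rewrite | github.com/jincao2013/word_extractor | corpora/lib.py | _get_html_table
-- ===== SOURCE A (Python) =====
-- def _get_html_table(words, words_per_row, cell_width=100, cell_height=50, c='#0d47a1', w='bold'):
--     table_html = "<table>\n"
--
--     table_html += "<style>"
--     table_html += "td {"
--     table_html += f"width: {cell_width}px;"
--     table_html += f"height: {cell_height}px;"
--     table_html += "font-size: 20px;"
--     # table_html += "font-weight: bold;"
--     table_html += "}"
--     table_html += "a {"
--     table_html += "text-decoration: none;"
--     # table_html += "color: inherit;"
--     # table_html += r"color: {};".format(c)
--     table_html += "}"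
--     table_html += "</style>\n"
--
--     # Generate table headers
--     # table_html += "<tr>"
--     # table_html += "<th>Index</th>"
--     # table_html += "<th>Word</th>"
--     # table_html += "</tr>\n"
--
--     # Generate table rows
--     for index, word in enumerate(words):
--         if index % words_per_row == 0:
--             table_html += "<tr>"
--
--         # table_html += f"<td>{index + 1}</td>"
--         table_html += r"<td><a href='http://www.ldoceonline.com/dictionary/{}' target='_blank'><span style='color: {}; text-decoration: none; font-weight: {};'>{}</span></a></td>".format(
--             word, c, w, word
--         )
--         # table_html += f"<td>{word}</td>"
--
--         if (index + 1) % words_per_row == 0 or (index + 1) == len(words):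
--             table_html += "</tr>\n"
--
--     table_html += "</table>"
--
--     return table_html
-- ===== SOURCE B (Python) =====
-- def _get_html_table(words, words_per_row, cell_width=100, cell_height=50, c='#0d47a1', w='bold'):
--     header = (
--         "<table>\n"
--         "<style>"
--         "td {width: " + str(cell_width) + "px;height: " + str(cell_height) + "px;font-size: 20px;}"
--         "a {text-decoration: none;}"
--         "</style>\n"
--     )
--     cell = ("<td><a href='http://www.ldoceonline.com/dictionary/{0}' target='_blank'>"
--             "<span style='color: {1}; text-decoration: none; font-weight: {2};'>{0}</span></a></td>")
--     rows = "".join(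
--         "<tr>"
--         + "".join(cell.format(word, c, w) for word in words[i:i + words_per_row])
--         + "</tr>\n"
--         for i in range(0, len(words), words_per_row)
--     )
--     return header + rows + "</table>"
-- ===== Notes on version B (the rewrite author's own statement) =====
-- stated objective: simpler
-- what changed: B slices the word list into consecutive chunks of words_per_row via range(0, len(words), words_per_row) and joins one '<tr>…</tr>' string per chunk, instead of A's flat enumerate loop that opens/closes rows with modulo tests on the running index.
import Mathlib
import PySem

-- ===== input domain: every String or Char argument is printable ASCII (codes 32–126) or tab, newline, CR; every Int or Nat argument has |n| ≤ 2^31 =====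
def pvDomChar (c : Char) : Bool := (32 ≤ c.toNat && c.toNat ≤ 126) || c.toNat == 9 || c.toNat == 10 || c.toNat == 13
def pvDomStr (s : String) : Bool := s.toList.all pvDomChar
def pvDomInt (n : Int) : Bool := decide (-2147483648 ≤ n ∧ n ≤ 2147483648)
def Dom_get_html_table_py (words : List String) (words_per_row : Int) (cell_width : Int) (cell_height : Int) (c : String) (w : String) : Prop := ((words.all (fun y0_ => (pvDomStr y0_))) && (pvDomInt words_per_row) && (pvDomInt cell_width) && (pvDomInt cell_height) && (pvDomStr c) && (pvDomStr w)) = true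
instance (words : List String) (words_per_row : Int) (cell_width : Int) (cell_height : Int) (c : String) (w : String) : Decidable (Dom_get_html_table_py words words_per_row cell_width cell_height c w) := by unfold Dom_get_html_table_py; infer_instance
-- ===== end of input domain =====

-- B rebuilds the table by slicing the word list into rows of words_per_row (range-with-step + join)
-- instead of A's flat enumerate loop with modulo tests; equivalence is proved for words_per_row ≥ 1.
-- (Strings are built on the List Char side throughout, per the PySem convention.)

-- ===== PORT A =====
def get_html_table_py (words : List String) (words_per_row : Int) (cell_width : Int) (cell_height : Int) (c : String) (w : String) : String :=
  -- table_html = "<table>\n" followed by the chain of += for the <style> block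
  let init : List Char :=
    "<table>\n".toList ++ "<style>".toList ++ "td {".toList
    ++ ("width: ".toList ++ PySem.Int.toChars cell_width ++ "px;".toList)
    ++ ("height: ".toList ++ PySem.Int.toChars cell_height ++ "px;".toList)
    ++ "font-size: 20px;".toList ++ "}".toList
    ++ "a {".toList ++ "text-decoration: none;".toList ++ "}".toList
    ++ "</style>\n".toList
  let n : Int := (words.length : Int)
  -- for index, word in enumerate(words): …
  let body : List Char := (PySem.List.enumerate words 0).foldl (fun acc iw =>
    let acc := if PySem.Int.mod iw.1 words_per_row == 0 then acc ++ "<tr>".toList else acc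
    let acc := acc ++
      ("<td><a href='http://www.ldoceonline.com/dictionary/".toList ++ iw.2.toList
       ++ "' target='_blank'><span style='color: ".toList ++ c.toList
       ++ "; text-decoration: none; font-weight: ".toList ++ w.toList
       ++ ";'>".toList ++ iw.2.toList ++ "</span></a></td>".toList)
    if PySem.Int.mod (iw.1 + 1) words_per_row == 0 || iw.1 + 1 == n then acc ++ "</tr>\n".toList else acc)
    init
  String.ofList (body ++ "</table>".toList)

-- ===== PORT B =====
-- cell template (Source B's `cell.format(word, c, w)`)
def pvCellB (c w word : List Char) : List Char :=
  "<td><a href='http://www.ldoceonline.com/dictionary/".toList ++ word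
  ++ "' target='_blank'><span style='color: ".toList ++ c
  ++ "; text-decoration: none; font-weight: ".toList ++ w
  ++ ";'>".toList ++ word ++ "</span></a></td>".toList

def get_html_table_py_alt (words : List String) (words_per_row : Int) (cell_width : Int) (cell_height : Int) (c : String) (w : String) : String :=
  let header : List Char :=
    "<table>\n<style>td {width: ".toList ++ PySem.Int.toChars cell_width
    ++ "px;height: ".toList ++ PySem.Int.toChars cell_height
    ++ "px;font-size: 20px;}a {text-decoration: none;}</style>\n".toList
  -- rows = "".join("<tr>" + "".join(cell.format(word, c, w) for word in words[i:i+words_per_row]) + "</tr>\n"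
  --                for i in range(0, len(words), words_per_row))
  let rows : List Char := PySem.Chars.join []
    ((PySem.List.pyRange 0 (words.length : Int) words_per_row).map (fun i =>
      "<tr>".toList
      ++ PySem.Chars.join []
           ((PySem.List.slice words (some i) (some (i + words_per_row))).map
             (fun word => pvCellB c.toList w.toList word.toList))
      ++ "</tr>\n".toList))
  String.ofList (header ++ rows ++ "</table>".toList)

-- ===== PRECONDITION & SPEC =====
-- Pre_ excludes words_per_row ≤ 0 (a nonsensical row width): A raises ZeroDivisionError there on
-- nonempty words (and B's range(…, words_per_row) raises ValueError for 0); on the remaining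
-- excluded inputs (words_per_row < 0, or 0 with empty words) A happens to return via Python's
-- signed modulo, outside the function's natural domain.
def Pre_get_html_table_py (words : List String) (words_per_row : Int) (cell_width : Int) (cell_height : Int) (c : String) (w : String) : Prop :=
  1 ≤ words_per_row
instance (words : List String) (words_per_row : Int) (cell_width : Int) (cell_height : Int) (c : String) (w : String) : Decidable (Pre_get_html_table_py words words_per_row cell_width cell_height c w) := by unfold Pre_get_html_table_py; infer_instance

def pvWitness_get_html_table_py : List String × Int × Int × Int × String × String :=
  (["cat", "dog", "owl"], 2, 100, 50, "#0d47a1", "bold")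

def Spec_get_html_table_py (words : List String) (words_per_row : Int) (cell_width : Int) (cell_height : Int) (c : String) (w : String) (out : String) : Prop := out = get_html_table_py_alt words words_per_row cell_width cell_height c w
instance (words : List String) (words_per_row : Int) (cell_width : Int) (cell_height : Int) (c : String) (w : String) (out : String) : Decidable (Spec_get_html_table_py words words_per_row cell_width cell_height c w out) := by unfold Spec_get_html_table_py; infer_instance

-- ===== CLAIM (what is proved, stated in full; the proofs are below) =====
def Claim_equal_get_html_table_py : Prop := ∀ (words : List String) (words_per_row : Int) (cell_width : Int) (cell_height : Int) (c : String) (w : String), Dom_get_html_table_py words words_per_row cell_width cell_height c w → Pre_get_html_table_py words words_per_row cell_width cell_height c w → Spec_get_html_table_py words words_per_row cell_width cell_height c w (get_html_table_py words words_per_row cell_width cell_height c w)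

-- ===== LEMMAS AND PROOFS =====

-- the common chunked row form both loops are reduced to (proof helper only)
def pvChunkRows (cell : String → List Char) (k : Nat) : List String → List Char
  | [] => []
  | x :: rest =>
    "<tr>".toList ++ (((x :: rest).take k).map cell).flatten ++ "</tr>\n".toList
      ++ pvChunkRows cell k ((x :: rest).drop (max k 1))
termination_by l => l.length
decreasing_by simp [List.length_drop]

-- the shape of A's output in the middle of a row (index s with s % k ≠ 0)
def pvTail (cell : String → List Char) (k : Nat) (cs : List String) (s : Nat) : List Char :=
  match cs with
  | [] => []
  | _ :: _ =>
    ((cs.take (k - s % k)).map cell).flatten ++ "</tr>\n".toList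
      ++ pvChunkRows cell k (cs.drop (k - s % k))

-- A's per-element contribution to the body, as a pure function of (index, word)
def pvG (c w : List Char) (k n : Nat) (iw : Int × String) : List Char :=
  (if PySem.Int.mod iw.1 (k : Int) == 0 then "<tr>".toList else [])
  ++ pvCellB c w iw.2.toList
  ++ (if PySem.Int.mod (iw.1 + 1) (k : Int) == 0 || iw.1 + 1 == (n : Int) then "</tr>\n".toList else [])

theorem pvJoin_nil_eq_flatten (l : List (List Char)) : PySem.Chars.join [] l = l.flatten := by
  induction l with
  | nil => simp [PySem.Chars.join_nil]
  | cons x r ih =>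
    cases r with
    | nil => simp [PySem.Chars.join_singleton]
    | cons y t => simp [PySem.Chars.join_cons_cons, ih]

theorem pvRange_pos_nil (a b s : Int) (hs : 0 < s) (hab : b ≤ a) :
    PySem.List.pyRange a b s = [] := by
  rw [PySem.List.pyRange_of_pos a b hs]
  simp [show ¬ a < b by omega]

theorem pvRange_pos_cons (a b s : Int) (hs : 0 < s) (hab : a < b) :
    PySem.List.pyRange a b s = a :: PySem.List.pyRange (a + s) b s := by
  rw [PySem.List.pyRange_of_pos a b hs, PySem.List.pyRange_of_pos (a+s) b hs]
  have hkey : ((b - a + s - 1) / s).toNat = (if a + s < b then ((b - (a+s) + s - 1) / s).toNat else 0) + 1 := by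
    by_cases h : a + s < b
    · rw [if_pos h]
      have he : b - a + s - 1 = (b - (a+s) + s - 1) + 1 * s := by ring
      rw [he, Int.add_mul_ediv_right _ _ (by omega : s ≠ 0)]
      have h1 : 0 ≤ (b - (a+s) + s - 1) / s := Int.ediv_nonneg (by omega) (by omega)
      omega
    · rw [if_neg h]
      have h1 : 1 ≤ (b - a + s - 1) / s := Int.le_ediv_iff_mul_le hs |>.mpr (by omega)
      have h2 : (b - a + s - 1) / s < 2 := Int.ediv_lt_iff_lt_mul hs |>.mpr (by omega)
      omega
  rw [if_pos hab, hkey, List.range_succ_eq_map]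
  simp only [List.map_cons, List.map_map, Nat.cast_zero, mul_zero, add_zero]
  congr 1
  apply List.map_congr_left
  intro j _
  simp only [Function.comp_apply]
  push_cast
  ring

theorem pvA_loop (c w : List Char) (k : Nat) (hk : 1 ≤ k) (n : Nat) :
    ∀ (cs : List String) (s : Nat), s + cs.length = n →
    (PySem.List.enumerate cs (s : Int)).flatMap (pvG c w k n)
      = (if s % k = 0 then pvChunkRows (fun x => pvCellB c w x.toList) k cs
         else pvTail (fun x => pvCellB c w x.toList) k cs s) := by
  obtain ⟨k', rfl⟩ : ∃ k', k = k' + 1 := ⟨k - 1, by omega⟩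
  have hmax : max (k' + 1) 1 = k' + 1 := by omega
  intro cs
  induction cs with
  | nil =>
    intro s hs
    rw [PySem.List.enumerate_nil, List.flatMap_nil]
    split <;> simp [pvChunkRows, pvTail]
  | cons x rest ih =>
    intro s hs
    simp only [List.length_cons] at hs
    rw [PySem.List.enumerate_cons, List.flatMap_cons]
    have hcast : ((s : Int) + 1) = ((s + 1 : Nat) : Int) := by push_cast; ring
    have hone : pvG c w (k'+1) n ((s : Int), x)
        = (if s % (k'+1) = 0 then "<tr>".toList else [])
          ++ pvCellB c w x.toList
          ++ (if (s+1) % (k'+1) = 0 ∨ s+1 = n then "</tr>\n".toList else []) := by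
      simp only [pvG, hcast, PySem.Int.mod_natCast, beq_iff_eq, Nat.cast_eq_zero, Nat.cast_inj,
        Bool.or_eq_true]
    rw [hcast, ih (s+1) (by omega), hone]
    have hE : (s+1) % (k'+1) = if s % (k'+1) + 1 = k' + 1 then 0 else s % (k'+1) + 1 := by
      rw [show s + 1 = (s % (k'+1) + 1) + (k'+1) * (s / (k'+1)) by
        have := Nat.mod_add_div s (k'+1); omega]
      rw [Nat.add_mul_mod_self_left]
      split
      · next h => rw [h]; exact Nat.mod_self _
      · next h =>
        exact Nat.mod_eq_of_lt (by have := Nat.mod_lt s (show 0 < k'+1 by omega); omega)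
    have hbound : s % (k'+1) < k' + 1 := Nat.mod_lt _ (by omega)
    obtain ⟨m, hm⟩ : ∃ m, k' + 1 - s % (k'+1) = m + 1 := ⟨k' - s % (k'+1), by omega⟩
    rcases rest with _ | ⟨y, t⟩
    · -- last word of the list
      have hn : s + 1 = n := by simp only [List.length_nil] at hs; omega
      rw [if_pos (Or.inr hn)]
      split_ifs with g1 g2 <;>
        simp [pvChunkRows, pvTail, hm, List.append_assoc]
    · have hne : ¬ (s + 1 = n) := by simp only [List.length_cons] at hs; omega
      simp only [hne, or_false]
      split_ifs with g1 g2
      · -- row of width 1 closes immediately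
        have hk1 : k' = 0 := by rw [g1] at hE; rw [g2] at hE; split at hE <;> omega
        subst hk1
        simp [pvChunkRows, pvTail, List.append_assoc]
      · -- row continues after its first cell
        have hmod : (s+1) % (k'+1) = 1 := by rw [g1] at hE; split at hE <;> omega
        have ht : k' + 1 - 1 = k' := by omega
        have hk2 : 1 ≤ k' := by
          rcases Nat.eq_zero_or_pos k' with h | h
          · subst h; omega
          · exact h
        obtain ⟨k2, rfl⟩ : ∃ k2, k' = k2 + 1 := ⟨k' - 1, by omega⟩
        simp [pvChunkRows, pvTail, hmod, hmax, ht, List.append_assoc]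
      · -- a middle cell closes the row
        have hsm : s % (k'+1) = k' := by split at hE <;> omega
        have hm1 : k' + 1 - s % (k'+1) = 1 := by omega
        simp [pvChunkRows, pvTail, hm1, hmax, List.append_assoc]
      · -- a middle cell, row still open
        have hmod : (s+1) % (k'+1) = s % (k'+1) + 1 := by split at hE <;> omega
        have hm2 : k' + 1 - (s+1) % (k'+1) = m := by omega
        simp [pvTail, hm, hm2, List.append_assoc]

theorem pvB_rows (c w : List Char) (k : Nat) (hk : 1 ≤ k) (words : List String) :
    ∀ (m : Nat) (cs : List String) (i : Nat), cs.length ≤ m → words.drop i = cs →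
    ((PySem.List.pyRange (i : Int) (words.length : Int) (k : Int)).map (fun j =>
        "<tr>".toList
        ++ PySem.Chars.join []
             ((PySem.List.slice words (some j) (some (j + (k : Int)))).map
               (fun word => pvCellB c w word.toList))
        ++ "</tr>\n".toList)).flatten
      = pvChunkRows (fun x => pvCellB c w x.toList) k cs := by
  obtain ⟨k', rfl⟩ : ∃ k', k = k' + 1 := ⟨k - 1, by omega⟩
  have hmax : max (k' + 1) 1 = k' + 1 := by omega
  intro m
  induction m with
  | zero =>
    intro cs i hlen hdrop
    have hcs : cs = [] := List.eq_nil_of_length_eq_zero (by omega)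
    subst hcs
    have hle : words.length ≤ i := by
      by_contra hlt
      have := congrArg List.length hdrop
      simp [List.length_drop] at this
      omega
    rw [pvRange_pos_nil _ _ _ (by positivity) (by exact_mod_cast hle)]
    simp [pvChunkRows]
  | succ m ih =>
    intro cs i hlen hdrop
    rcases cs with _ | ⟨x, rest⟩
    · have hle : words.length ≤ i := by
        by_contra hlt
        have := congrArg List.length hdrop
        simp [List.length_drop] at this
        omega
      rw [pvRange_pos_nil _ _ _ (by positivity) (by exact_mod_cast hle)]
      simp [pvChunkRows]
    · have hlt : i < words.length := by
        by_contra hge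
        rw [List.drop_eq_nil_of_le (by omega)] at hdrop
        exact (List.cons_ne_nil x rest) hdrop.symm
      rw [pvRange_pos_cons _ _ _ (by positivity) (by exact_mod_cast hlt)]
      rw [List.map_cons, List.flatten_cons]
      have hslice : PySem.List.slice words (some (i : Int)) (some ((i : Int) + ((k'+1 : Nat) : Int)))
          = (x :: rest).take (k' + 1) := by
        rw [PySem.List.slice_natCast_add words i (k' + 1), hdrop]
      have hcast : (i : Int) + ((k'+1 : Nat) : Int) = ((i + (k' + 1) : Nat) : Int) := by push_cast; ring
      have hdrop2 : List.drop (i + (k' + 1)) words = List.drop k' rest := by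
        have h2 := congrArg (List.drop (k' + 1)) hdrop
        rw [List.drop_drop] at h2
        rw [h2, List.drop_succ_cons]
      rw [hslice, hcast, ih (rest.drop k') (i + (k' + 1))
        (by simp only [List.length_cons] at hlen; simp [List.length_drop]; omega)
        hdrop2]
      rw [pvJoin_nil_eq_flatten]
      simp [pvChunkRows, List.append_assoc, List.drop_succ_cons]


theorem pvHeader_eq (u v : List Char) :
    "<table>\n".toList ++ "<style>".toList ++ "td {".toList
      ++ ("width: ".toList ++ u ++ "px;".toList)
      ++ ("height: ".toList ++ v ++ "px;".toList)
      ++ "font-size: 20px;".toList ++ "}".toList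
      ++ "a {".toList ++ "text-decoration: none;".toList ++ "}".toList
      ++ "</style>\n".toList
    = "<table>\n<style>td {width: ".toList ++ u
      ++ "px;height: ".toList ++ v
      ++ "px;font-size: 20px;}a {text-decoration: none;}</style>\n".toList := by
  have h1 : ("<table>\n".toList ++ "<style>".toList ++ "td {".toList ++ "width: ".toList : List Char)
      = "<table>\n<style>td {width: ".toList := by decide
  have h2 : ("px;".toList ++ "height: ".toList : List Char) = "px;height: ".toList := by decide
  have h3 : ("px;".toList ++ "font-size: 20px;".toList ++ "}".toList ++ "a {".toList
      ++ "text-decoration: none;".toList ++ "}".toList ++ "</style>\n".toList : List Char)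
      = "px;font-size: 20px;}a {text-decoration: none;}</style>\n".toList := by decide
  calc _ = ("<table>\n".toList ++ "<style>".toList ++ "td {".toList ++ "width: ".toList) ++ u
        ++ ("px;".toList ++ "height: ".toList) ++ v
        ++ ("px;".toList ++ "font-size: 20px;".toList ++ "}".toList ++ "a {".toList
            ++ "text-decoration: none;".toList ++ "}".toList ++ "</style>\n".toList) := by
          simp [List.append_assoc]
    _ = _ := by rw [h1, h2, h3]

-- ===== VERDICT (by name: the statement is the Claim_ definition above) =====
theorem get_html_table_py_spec : Claim_equal_get_html_table_py := by
  intro words wpr cw ch c w hdom hpre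
  unfold Pre_get_html_table_py at hpre
  unfold Spec_get_html_table_py
  obtain ⟨k, rfl⟩ : ∃ k : Nat, wpr = (k : Int) := ⟨wpr.toNat, (Int.toNat_of_nonneg (by omega)).symm⟩
  have hk : 1 ≤ k := by exact_mod_cast hpre
  unfold get_html_table_py get_html_table_py_alt
  dsimp only
  have hfold : ∀ init : List Char, (PySem.List.enumerate words 0).foldl (fun acc (iw : Int × String) =>
      let acc := if PySem.Int.mod iw.1 (k : Int) == 0 then acc ++ "<tr>".toList else acc
      let acc := acc ++
        ("<td><a href='http://www.ldoceonline.com/dictionary/".toList ++ iw.2.toList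
         ++ "' target='_blank'><span style='color: ".toList ++ c.toList
         ++ "; text-decoration: none; font-weight: ".toList ++ w.toList
         ++ ";'>".toList ++ iw.2.toList ++ "</span></a></td>".toList)
      if PySem.Int.mod (iw.1 + 1) (k : Int) == 0 || iw.1 + 1 == ((words.length : Nat) : Int) then
        acc ++ "</tr>\n".toList else acc) init
      = init ++ (PySem.List.enumerate words 0).flatMap (pvG c.toList w.toList k words.length) := by
    intro init
    have hbody : (fun acc (iw : Int × String) =>
        let acc := if PySem.Int.mod iw.1 (k : Int) == 0 then acc ++ "<tr>".toList else acc
        let acc := acc ++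
          ("<td><a href='http://www.ldoceonline.com/dictionary/".toList ++ iw.2.toList
           ++ "' target='_blank'><span style='color: ".toList ++ c.toList
           ++ "; text-decoration: none; font-weight: ".toList ++ w.toList
           ++ ";'>".toList ++ iw.2.toList ++ "</span></a></td>".toList)
        if PySem.Int.mod (iw.1 + 1) (k : Int) == 0 || iw.1 + 1 == ((words.length : Nat) : Int) then
          acc ++ "</tr>\n".toList else acc)
        = (fun acc iw => acc ++ pvG c.toList w.toList k words.length iw) := by
      funext acc iw
      simp only [pvG, pvCellB]
      split_ifs <;> simp [List.append_assoc]
    rw [hbody]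
    exact PySem.List.foldl_append_eq_flatMap _ _ _
  rw [hfold, pvJoin_nil_eq_flatten]
  have hA := pvA_loop c.toList w.toList k hk words.length words 0 (by simp)
  simp only [Nat.cast_zero, Nat.zero_mod, if_pos] at hA
  rw [hA]
  have hB := pvB_rows c.toList w.toList k hk words words.length words 0 le_rfl List.drop_zero
  simp only [Nat.cast_zero] at hB
  rw [hB]
  rw [pvHeader_eq]
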